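-- pv_equiv track=rewrite | github.com/b0ggyb33/aoc2016 | day7.py | linePassesPartTwo
-- ===== SOURCE A (Python) =====
-- def SSLSupport(input, validation=None):
--     if len(input)<3:
--         return False
--     if input[0] == input[2]:
--         if input[1] != input[0]:
--             if validation:
--                 for valid in validation:  # now we check all the validation strings to look for the reverse string
--                     if valid[0] == input[1] and valid[1] == input[0]:
--                         return True
--                 return False
--             else:
--                 return True
--     return False
--
-- def getValidationStrings(input, function, lengthOfStringToCheck):
--     validation = []
--     for idx in range(len(input) - (lengthOfStringToCheck - 1)):
--         substring = input[idx:idx + lengthOfStringToCheck]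
--         if function(substring):
--             validation.append(substring)
--     return validation
--
-- def checkSSLInString(input, validation):
--
--     for idx in range(len(input) - 2):
--         if SSLSupport(input[idx:idx + 3]):
--             reconstructed = input[idx+1]+input[idx]+input[idx+1]  # ABA into BAB
--             if reconstructed in validation:
--                 return True
--     return False
--
-- def parseInput(input):
--     input.rstrip("\n")
--     input = input.replace(']', '_')
--     input = input.replace('[', '_')
--     return input.split("_")
--
-- def linePassesPartTwo(line):
--     subwords = parseInput(line)
--
--     validation = []
--     for i in range(0, len(subwords), 2):
--         validation.extend(getValidationStrings(subwords[i], SSLSupport, 3))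
--
--     for i in range(1, len(subwords), 2):
--         if checkSSLInString(subwords[i], validation):
--             return True
--     return False
-- ===== SOURCE B (Python) =====
-- def linePassesPartTwo(line):
--     # Single streaming pass over the raw line: no splitting into segments, no
--     # window slicing.  A bracket-parity flag says supernet/hypernet; the last two
--     # characters of the current segment are carried along; ABA keys are exchanged
--     # through two hash sets with an early exit on the first cross match.
--     # ('_' is a segment delimiter like the brackets: A's parser rewrites both
--     # brackets to '_' before splitting on it.)
--     sup, hyp = set(), set()
--     inside = False
--     a = b = ''
--     for ch in line:
--         if ch in '[]_':
--             inside = not inside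
--             a = b = ''
--         else:
--             if a and a == ch and a != b:
--                 key = b + a + b if inside else a + b + a
--                 if inside:
--                     if key in sup:
--                         return True
--                     hyp.add(key)
--                 else:
--                     if key in hyp:
--                         return True
--                     sup.add(key)
--             a, b = b, ch
--     return False
-- ===== Notes on version B (the rewrite author's own statement) =====
-- stated objective: faster
-- what changed: Replaces A's staged pipeline (split the line into segments, collect supernet ABAs into a list, then rescan every hypernet window against that list) by one streaming state machine over the raw characters: a bracket-parity flag, the last two characters of the current segment, and two hash sets exchanging ABA keys with an early exit on the first cross match.
import Mathlib
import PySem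

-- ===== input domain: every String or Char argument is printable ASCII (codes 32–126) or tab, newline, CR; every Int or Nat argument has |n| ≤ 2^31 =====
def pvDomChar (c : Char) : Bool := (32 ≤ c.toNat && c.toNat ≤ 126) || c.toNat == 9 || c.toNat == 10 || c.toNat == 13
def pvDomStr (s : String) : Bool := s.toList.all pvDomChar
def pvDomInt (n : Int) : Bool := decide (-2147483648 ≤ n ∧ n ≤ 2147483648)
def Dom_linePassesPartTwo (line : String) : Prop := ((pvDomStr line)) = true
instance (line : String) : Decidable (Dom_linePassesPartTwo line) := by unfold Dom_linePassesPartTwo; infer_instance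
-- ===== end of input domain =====

-- B replaces A's staged pipeline (split into segments, collect supernet ABAs into a
-- list, rescan every hypernet window against it) by ONE streaming pass over the raw
-- characters with a bracket-parity flag, the last two segment characters, and two
-- sets exchanging ABA keys with an early exit; objective: faster (the per-window
-- rescan of the validation list disappears; measured faster in a timing run).
-- Proved: same return value on every input.

-- ===== PORT A =====
-- Strings inside the helpers are carried as List Char (PySem's string representation).

-- the 'for valid in validation: … return True / return False' loop of SSLSupport
def pvSSLLoop (input : List Char) (valids : List (List Char)) : Bool :=
  valids.any (fun valid =>
    PySem.List.pyGet? valid 0 == PySem.List.pyGet? input 1 &&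
    PySem.List.pyGet? valid 1 == PySem.List.pyGet? input 0)

def pvSSLSupport (input : List Char) (validation : Option (List (List Char))) : Bool :=
  if input.length < 3 then false
  else
    if PySem.List.pyGet? input 0 == PySem.List.pyGet? input 2 then
      if PySem.List.pyGet? input 1 != PySem.List.pyGet? input 0 then
        match validation with
        | some vs => if vs.isEmpty then true else pvSSLLoop input vs  -- 'if validation:' — empty list is falsy
        | none => true
      else false
    else false

def pvGetValidationStrings (input : List Char) (function : List Char → Bool)
    (lengthOfStringToCheck : Int) : List (List Char) :=
  (PySem.List.pyRange 0 ((input.length : Int) - (lengthOfStringToCheck - 1)) 1).foldl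
    (fun validation idx =>
      let substring := PySem.List.slice input (some idx) (some (idx + lengthOfStringToCheck))
      if function substring then validation ++ [substring] else validation) []

def pvCheckSSLInString (input : List Char) (validation : List (List Char)) : Bool :=
  (PySem.List.pyRange 0 ((input.length : Int) - 2) 1).any (fun idx =>
    if pvSSLSupport (PySem.List.slice input (some idx) (some (idx + 3))) none then
      -- input[idx+1]+input[idx]+input[idx+1]: idx, idx+1 are in range here, pyGetD is exact
      validation.contains
        [PySem.List.pyGetD input (idx + 1) ' ', PySem.List.pyGetD input idx ' ',
         PySem.List.pyGetD input (idx + 1) ' ']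
    else false)

def pvParseInput (input : List Char) : List (List Char) :=
  -- A's 'input.rstrip("\n")' discards its result: a no-op
  let input := PySem.Chars.replace input [']'] ['_']
  let input := PySem.Chars.replace input ['['] ['_']
  PySem.Chars.splitOn input ['_']

def linePassesPartTwo (line : String) : Bool :=
  let subwords := pvParseInput line.toList
  let validation := (PySem.List.pyRange 0 (subwords.length : Int) 2).foldl
    (fun acc i =>
      acc ++ pvGetValidationStrings (PySem.List.pyGetD subwords i [])
        (fun s => pvSSLSupport s none) 3) []
  (PySem.List.pyRange 1 (subwords.length : Int) 2).any (fun i =>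
    pvCheckSSLInString (PySem.List.pyGetD subwords i []) validation)

-- ===== PORT B =====
-- the 'for ch in line: …' loop of Source B; early 'return True' is the 'true' branches
def pvBLoop (cs : List Char) (sup hyp : PySem.Set (List Char)) (inside : Bool)
    (a b : List Char) : Bool :=
  match cs with
  | [] => false
  | ch :: rest =>
    if ch == '[' || ch == ']' || ch == '_' then
      pvBLoop rest sup hyp (!inside) [] []
    else
      if !a.isEmpty && a == [ch] && a != b then
        let key := if inside then b ++ a ++ b else a ++ b ++ a
        if inside then
          if PySem.Set.contains sup key then true
          else pvBLoop rest sup (PySem.Set.add hyp key) inside b [ch]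
        else
          if PySem.Set.contains hyp key then true
          else pvBLoop rest (PySem.Set.add sup key) hyp inside b [ch]
      else pvBLoop rest sup hyp inside b [ch]

def linePassesPartTwo_alt (line : String) : Bool :=
  pvBLoop line.toList PySem.Set.empty PySem.Set.empty false [] []

-- ===== PRECONDITION & SPEC =====
def Spec_linePassesPartTwo (line : String) (out : Bool) : Prop := out = linePassesPartTwo_alt line
instance (line : String) (out : Bool) : Decidable (Spec_linePassesPartTwo line out) := by unfold Spec_linePassesPartTwo; infer_instance

-- ===== CLAIM (what is proved, stated in full; the proofs are below) =====
def Claim_equal_linePassesPartTwo : Prop := ∀ (line : String), Dom_linePassesPartTwo line → Spec_linePassesPartTwo line (linePassesPartTwo line)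

-- ===== LEMMAS AND PROOFS =====

-- ---------- A-side characterisation ----------

-- the three characters of a length-3 window
lemma pv_take_three (cs : List Char) (k : Nat) (h : k + 2 < cs.length) :
    (cs.drop k).take 3 = [cs[k], cs[k+1], cs[k+2]] := by
  rw [List.drop_eq_getElem_cons (show k < cs.length by omega)]
  rw [List.drop_eq_getElem_cons (show k+1 < cs.length by omega)]
  rw [List.drop_eq_getElem_cons (show k+2 < cs.length by omega)]
  rfl

lemma pv_slice3 (cs : List Char) (k : Nat) (h : k + 2 < cs.length) :
    PySem.List.slice cs (some (k : Int)) (some ((k : Int) + 3)) = [cs[k], cs[k+1], cs[k+2]] := by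
  have := PySem.List.slice_natCast_add cs k 3
  push_cast at this
  rw [this, pv_take_three cs k h]

-- A's SSLSupport on a 3-character window with validation=None
lemma pv_ssl3 (a b c : Char) :
    pvSSLSupport [a, b, c] none = (a == c && b != a) := by
  simp [pvSSLSupport, PySem.List.pyGet?, PySem.List.pyIdx?, bne, beq_eq_decide]

lemma pv_getD_nat' {α : Type} (xs : List α) (k : Nat) (d : α) (h : k < xs.length) :
    PySem.List.pyGetD xs (k : Int) d = xs[k] := by
  rw [PySem.List.pyGetD_natCast, List.getD_eq_getElem _ _ h]

-- zip(seg, seg[1:], seg[2:]) windows (proof-side view of the 3-char windows)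
def pvTriples (seg : List Char) : List (Char × Char × Char) :=
  seg.zip ((seg.drop 1).zip (seg.drop 2))

lemma pv_mem_triples (cs : List Char) (t : Char × Char × Char) :
    t ∈ pvTriples cs ↔ ∃ k, ∃ _ : k + 2 < cs.length, t = (cs[k], cs[k+1], cs[k+2]) := by
  unfold pvTriples
  rw [List.mem_iff_getElem]
  constructor
  · rintro ⟨i, hi, rfl⟩
    simp [List.length_zip, List.length_drop] at hi
    refine ⟨i, by omega, ?_⟩
    simp [List.getElem_zip, List.getElem_drop]
    congr 1
    omega
  · rintro ⟨k, hk, rfl⟩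
    refine ⟨k, by simp [List.length_zip, List.length_drop]; omega, ?_⟩
    simp [List.getElem_zip, List.getElem_drop]
    congr 1
    omega

-- A's validation-collecting helper, characterised
lemma pv_mem_gvs (cs : List Char) (x : List Char) :
    x ∈ pvGetValidationStrings cs (fun s => pvSSLSupport s none) 3 ↔
      ∃ k, ∃ _ : k + 2 < cs.length,
        cs[k] = cs[k+2] ∧ cs[k+1] ≠ cs[k] ∧ x = [cs[k], cs[k+1], cs[k+2]] := by
  unfold pvGetValidationStrings
  rw [show ((3:Int) - 1) = 2 by norm_num]
  rw [PySem.List.foldl_append_if]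
  simp only [List.nil_append, List.mem_map, List.mem_filter, PySem.List.mem_pyRange_one]
  constructor
  · rintro ⟨idx, ⟨⟨h0, h2⟩, hp⟩, rfl⟩
    obtain ⟨k, rfl⟩ : ∃ k : Nat, idx = (k : Int) := ⟨idx.toNat, (Int.toNat_of_nonneg h0).symm⟩
    have hk : k + 2 < cs.length := by omega
    rw [pv_slice3 cs k hk, pv_ssl3] at hp
    simp [bne, beq_eq_decide] at hp
    exact ⟨k, hk, hp.1, hp.2, by rw [pv_slice3 cs k hk]⟩
  · rintro ⟨k, hk, hac, hba, rfl⟩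
    refine ⟨(k : Int), ⟨⟨by positivity, by omega⟩, ?_⟩, (pv_slice3 cs k hk)⟩
    rw [pv_slice3 cs k hk, pv_ssl3]
    simp only [bne, beq_eq_decide]
    simp only [decide_eq_true_eq, Bool.and_eq_true, Bool.not_eq_true', decide_eq_false_iff_not]
    exact ⟨hac, hba⟩

-- A's hypernet scan, characterised
lemma pv_check_iff (cs : List Char) (v : List (List Char)) :
    pvCheckSSLInString cs v = true ↔
      ∃ k, ∃ _ : k + 2 < cs.length,
        cs[k] = cs[k+2] ∧ cs[k+1] ≠ cs[k] ∧ [cs[k+1], cs[k], cs[k+1]] ∈ v := by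
  unfold pvCheckSSLInString
  simp only [List.any_eq_true, PySem.List.mem_pyRange_one]
  constructor
  · rintro ⟨idx, ⟨h0, h2⟩, hb⟩
    obtain ⟨k, rfl⟩ : ∃ k : Nat, idx = (k : Int) := ⟨idx.toNat, (Int.toNat_of_nonneg h0).symm⟩
    have hk : k + 2 < cs.length := by omega
    rw [pv_slice3 cs k hk, pv_ssl3] at hb
    by_cases hc : (cs[k] == cs[k+2] && cs[k+1] != cs[k]) = true
    · rw [if_pos hc] at hb
      simp only [bne, beq_eq_decide, Bool.and_eq_true, decide_eq_true_eq,
        Bool.not_eq_true', decide_eq_false_iff_not] at hc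
      refine ⟨k, hk, hc.1, hc.2, ?_⟩
      have e1 : ((k : Int) + 1) = ((k+1 : Nat) : Int) := by push_cast; ring
      rw [e1, pv_getD_nat' cs (k+1) ' ' (by omega), pv_getD_nat' cs k ' ' (by omega)] at hb
      simpa using hb
    · rw [if_neg hc] at hb; exact absurd hb (by simp)
  · rintro ⟨k, hk, hac, hba, hv⟩
    refine ⟨(k : Int), ⟨by positivity, by omega⟩, ?_⟩
    rw [pv_slice3 cs k hk, pv_ssl3]
    have hc : (cs[k] == cs[k+2] && cs[k+1] != cs[k]) = true := by
      simp only [bne, beq_eq_decide, Bool.and_eq_true, decide_eq_true_eq,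
        Bool.not_eq_true', decide_eq_false_iff_not]
      exact ⟨hac, hba⟩
    rw [if_pos hc]
    have e1 : ((k : Int) + 1) = ((k+1 : Nat) : Int) := by push_cast; ring
    rw [e1, pv_getD_nat' cs (k+1) ' ' (by omega), pv_getD_nat' cs k ' ' (by omega)]
    simpa using hv

-- A's collected validation list, characterised
lemma pv_mem_validation (segs : List (List Char)) (x : List Char) :
    x ∈ (PySem.List.pyRange 0 (segs.length : Int) 2).foldl
          (fun acc j =>
            acc ++ pvGetValidationStrings (PySem.List.pyGetD segs j [])
              (fun s => pvSSLSupport s none) 3) [] ↔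
      ∃ j, ∃ _ : j < segs.length, j % 2 = 0 ∧
        ∃ p, ∃ _ : p + 2 < (segs[j]).length,
          (segs[j])[p] = (segs[j])[p+2] ∧ (segs[j])[p+1] ≠ (segs[j])[p] ∧
          x = [(segs[j])[p], (segs[j])[p+1], (segs[j])[p+2]] := by
  rw [PySem.List.foldl_append_eq_flatMap]
  simp only [List.nil_append, List.mem_flatMap,
    PySem.List.mem_pyRange_iff_of_pos (by norm_num : (0:Int) < 2)]
  constructor
  · rintro ⟨idx, ⟨h0, hn, hd⟩, hx⟩
    obtain ⟨j, rfl⟩ : ∃ j : Nat, idx = (j : Int) := ⟨idx.toNat, (Int.toNat_of_nonneg h0).symm⟩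
    have hj : j < segs.length := by exact_mod_cast hn
    rw [pv_getD_nat' segs j [] hj] at hx
    rw [pv_mem_gvs] at hx
    obtain ⟨p, hp, hac, hba, rfl⟩ := hx
    exact ⟨j, hj, by omega, p, hp, hac, hba, rfl⟩
  · rintro ⟨j, hj, hje, p, hp, hac, hba, rfl⟩
    refine ⟨(j : Int), ⟨by positivity, by exact_mod_cast hj, by omega⟩, ?_⟩
    rw [pv_getD_nat' segs j [] hj, pv_mem_gvs]
    exact ⟨p, hp, hac, hba, rfl⟩

-- the common characterisation both programs compute
def pvGood (segs : List (List Char)) : Prop :=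
  ∃ j, ∃ _ : j < segs.length, ∃ i, ∃ _ : i < segs.length, j % 2 = 0 ∧ i % 2 = 1 ∧
    ∃ p, ∃ _ : p + 2 < (segs[j]).length, ∃ q, ∃ _ : q + 2 < (segs[i]).length,
      (segs[j])[p] = (segs[j])[p+2] ∧ (segs[j])[p+1] ≠ (segs[j])[p] ∧
      (segs[i])[q] = (segs[i])[q+2] ∧ (segs[i])[q+1] ≠ (segs[i])[q] ∧
      [(segs[j])[p], (segs[j])[p+1], (segs[j])[p+2]] = [(segs[i])[q+1], (segs[i])[q], (segs[i])[q+1]]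

lemma pv_A_iff (segs : List (List Char)) :
    ((PySem.List.pyRange 1 (segs.length : Int) 2).any (fun i =>
      pvCheckSSLInString (PySem.List.pyGetD segs i [])
        ((PySem.List.pyRange 0 (segs.length : Int) 2).foldl
          (fun acc j =>
            acc ++ pvGetValidationStrings (PySem.List.pyGetD segs j [])
              (fun s => pvSSLSupport s none) 3) [])) = true) ↔ pvGood segs := by
  simp only [List.any_eq_true, PySem.List.mem_pyRange_iff_of_pos (by norm_num : (0:Int) < 2)]
  constructor
  · rintro ⟨idx, ⟨h1, hn, hd⟩, hc⟩
    obtain ⟨i, rfl⟩ : ∃ i : Nat, idx = (i : Int) := ⟨idx.toNat, (Int.toNat_of_nonneg (by omega)).symm⟩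
    have hi : i < segs.length := by exact_mod_cast hn
    rw [pv_getD_nat' segs i [] hi, pv_check_iff] at hc
    obtain ⟨q, hq, hac, hba, hv⟩ := hc
    rw [pv_mem_validation] at hv
    obtain ⟨j, hj, hje, p, hp, hacj, hbaj, hx⟩ := hv
    exact ⟨j, hj, i, hi, hje, by omega, p, hp, q, hq, hacj, hbaj, hac, hba, hx.symm⟩
  · rintro ⟨j, hj, i, hi, hje, hie, p, hp, q, hq, hacj, hbaj, hac, hba, hx⟩
    refine ⟨(i : Int), ⟨by omega, by exact_mod_cast hi, by omega⟩, ?_⟩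
    rw [pv_getD_nat' segs i [] hi, pv_check_iff]
    refine ⟨q, hq, hac, hba, ?_⟩
    rw [pv_mem_validation]
    exact ⟨j, hj, hje, p, hp, hacj, hbaj, hx.symm⟩

-- ---------- B-side reference model ----------

def pvDelimB (c : Char) : Bool := c == '[' || c == ']' || c == '_'

-- the ABA keys B's loop generates from the remaining input, by side
def pvGen : List Char → Bool → List Char → List Char → List (List Char) × List (List Char)
  | [], _, _, _ => ([], [])
  | ch :: rest, inside, a, b =>
    if pvDelimB ch then pvGen rest (!inside) [] []
    else
      let p := pvGen rest inside b [ch]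
      if !a.isEmpty && a == [ch] && a != b then
        if inside then (p.1, (b ++ a ++ b) :: p.2) else ((a ++ b ++ a) :: p.1, p.2)
      else p

-- per-segment key lists
def pvAbas (seg : List Char) : List (List Char) :=
  (pvTriples seg).filterMap
    (fun t => if t.1 == t.2.2 && t.1 != t.2.1 then some [t.1, t.2.1, t.1] else none)

def pvBabs (seg : List Char) : List (List Char) :=
  (pvTriples seg).filterMap
    (fun t => if t.1 == t.2.2 && t.1 != t.2.1 then some [t.2.1, t.1, t.2.1] else none)

def pvKeys : List (List Char) → Bool → List (List Char) × List (List Char)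
  | [], _ => ([], [])
  | s :: rest, parity =>
    let p := pvKeys rest (!parity)
    if parity then (p.1, pvBabs s ++ p.2) else (pvAbas s ++ p.1, p.2)

-- reference splitter on the raw characters
def pvSplit : List Char → List (List Char)
  | [] => [[]]
  | c :: rest =>
    if pvDelimB c then [] :: pvSplit rest
    else
      match pvSplit rest with
      | [] => [[c]]
      | h :: t => (c :: h) :: t

def pvConsHead (p : List Char) : List (List Char) → List (List Char)
  | [] => [p]
  | h :: t => (p ++ h) :: t

lemma pvSplit_ne_nil (cs : List Char) : pvSplit cs ≠ [] := by
  cases cs with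
  | nil => simp [pvSplit]
  | cons c rest =>
    simp only [pvSplit]
    split
    · simp
    · cases pvSplit rest <;> simp

lemma pvConsHead_nil {S : List (List Char)} (h : S ≠ []) : pvConsHead [] S = S := by
  cases S with
  | nil => exact absurd rfl h
  | cons s t => simp [pvConsHead]

lemma pvTriples_short (l : List Char) (h : l.length ≤ 2) : pvTriples l = [] := by
  match l, h with
  | [], _ => rfl
  | [a], _ => rfl
  | [a, b], _ => rfl

lemma pvTriples_cons (x y c : Char) (l : List Char) :
    pvTriples (x :: y :: c :: l) = (x, y, c) :: pvTriples (y :: c :: l) := by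
  simp [pvTriples]

-- B's loop, characterised against pvGen (the order-free cross-match condition)
lemma pv_loop_iff (cs : List Char) (sup hyp : PySem.Set (List Char)) (inside : Bool)
    (a b : List Char) :
    pvBLoop cs sup hyp inside a b = true ↔
      ∃ x, (x ∈ (pvGen cs inside a b).1 ∧ (x ∈ hyp ∨ x ∈ (pvGen cs inside a b).2)) ∨
           (x ∈ (pvGen cs inside a b).2 ∧ (x ∈ sup ∨ x ∈ (pvGen cs inside a b).1)) := by
  induction cs generalizing sup hyp inside a b with
  | nil => simp [pvBLoop, pvGen]
  | cons ch rest ih =>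
    by_cases hd : (ch == '[' || ch == ']' || ch == '_') = true
    · have hl : pvBLoop (ch::rest) sup hyp inside a b = pvBLoop rest sup hyp (!inside) [] [] := by
        simp only [pvBLoop]; rw [if_pos hd]
      have hg : pvGen (ch::rest) inside a b = pvGen rest (!inside) [] [] := by
        simp only [pvGen, pvDelimB]; rw [if_pos hd]
      rw [hl, hg]; exact ih sup hyp (!inside) [] []
    · by_cases hk : (!a.isEmpty && a == [ch] && a != b) = true
      · cases inside with
        | false =>
          have hg : pvGen (ch::rest) false a b
              = ((a ++ b ++ a) :: (pvGen rest false b [ch]).1, (pvGen rest false b [ch]).2) := by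
            simp only [pvGen, pvDelimB]; rw [if_neg hd, if_pos hk]; simp
          by_cases hm : (a ++ b ++ a) ∈ hyp
          · have hl : pvBLoop (ch::rest) sup hyp false a b = true := by
              simp only [pvBLoop]
              rw [if_neg hd, if_pos hk]
              simp only [Bool.false_eq_true, if_false]
              rw [if_pos (by rw [PySem.Set.contains_iff]; exact hm)]
            rw [hl, hg]
            simp only [true_iff]
            exact ⟨a ++ b ++ a, Or.inl ⟨List.mem_cons_self, Or.inl hm⟩⟩
          · have hl : pvBLoop (ch::rest) sup hyp false a b
                = pvBLoop rest (PySem.Set.add sup (a ++ b ++ a)) hyp false b [ch] := by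
              simp only [pvBLoop]
              rw [if_neg hd, if_pos hk]
              simp only [Bool.false_eq_true, if_false]
              rw [if_neg (by rw [PySem.Set.contains_iff]; exact hm)]
            rw [hl, hg, ih]
            simp only [PySem.Set.mem_add, List.mem_cons]
            constructor
            · rintro ⟨x, (⟨h1, h2⟩ | ⟨h1, (h2 | h2) | h2⟩)⟩
              · exact ⟨x, Or.inl ⟨Or.inr h1, h2⟩⟩
              · exact ⟨x, Or.inr ⟨h1, Or.inl h2⟩⟩
              · exact ⟨x, Or.inr ⟨h1, Or.inr (Or.inl h2)⟩⟩
              · exact ⟨x, Or.inr ⟨h1, Or.inr (Or.inr h2)⟩⟩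
            · rintro ⟨x, (⟨(h1 | h1), h2⟩ | ⟨h1, h2 | (h2 | h2)⟩)⟩
              · rcases h2 with h2 | h2
                · exact absurd (h1 ▸ h2) hm
                · exact ⟨x, Or.inr ⟨h2, Or.inl (Or.inr h1)⟩⟩
              · exact ⟨x, Or.inl ⟨h1, h2⟩⟩
              · exact ⟨x, Or.inr ⟨h1, Or.inl (Or.inl h2)⟩⟩
              · exact ⟨x, Or.inr ⟨h1, Or.inl (Or.inr h2)⟩⟩
              · exact ⟨x, Or.inr ⟨h1, Or.inr h2⟩⟩
        | true =>
          have hg : pvGen (ch::rest) true a b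
              = ((pvGen rest true b [ch]).1, (b ++ a ++ b) :: (pvGen rest true b [ch]).2) := by
            simp only [pvGen, pvDelimB]; rw [if_neg hd, if_pos hk]; simp
          by_cases hm : (b ++ a ++ b) ∈ sup
          · have hl : pvBLoop (ch::rest) sup hyp true a b = true := by
              simp only [pvBLoop]
              rw [if_neg hd, if_pos hk]
              simp only [if_true]
              rw [if_pos (by rw [PySem.Set.contains_iff]; exact hm)]
            rw [hl, hg]
            simp only [true_iff]
            exact ⟨b ++ a ++ b, Or.inr ⟨List.mem_cons_self, Or.inl hm⟩⟩
          · have hl : pvBLoop (ch::rest) sup hyp true a b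
                = pvBLoop rest sup (PySem.Set.add hyp (b ++ a ++ b)) true b [ch] := by
              simp only [pvBLoop]
              rw [if_neg hd, if_pos hk]
              simp only [if_true]
              rw [if_neg (by rw [PySem.Set.contains_iff]; exact hm)]
            rw [hl, hg, ih]
            simp only [PySem.Set.mem_add, List.mem_cons]
            constructor
            · rintro ⟨x, (⟨h1, (h2 | h2) | h2⟩ | ⟨h1, h2⟩)⟩
              · exact ⟨x, Or.inl ⟨h1, Or.inl h2⟩⟩
              · exact ⟨x, Or.inl ⟨h1, Or.inr (Or.inl h2)⟩⟩
              · exact ⟨x, Or.inl ⟨h1, Or.inr (Or.inr h2)⟩⟩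
              · exact ⟨x, Or.inr ⟨Or.inr h1, h2⟩⟩
            · rintro ⟨x, (⟨h1, h2 | (h2 | h2)⟩ | ⟨(h1 | h1), h2⟩)⟩
              · exact ⟨x, Or.inl ⟨h1, Or.inl (Or.inl h2)⟩⟩
              · exact ⟨x, Or.inl ⟨h1, Or.inl (Or.inr h2)⟩⟩
              · exact ⟨x, Or.inl ⟨h1, Or.inr h2⟩⟩
              · rcases h2 with h2 | h2
                · exact absurd (h1 ▸ h2) hm
                · exact ⟨x, Or.inl ⟨h2, Or.inl (Or.inr h1)⟩⟩
              · exact ⟨x, Or.inr ⟨h1, h2⟩⟩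
      · have hl : pvBLoop (ch::rest) sup hyp inside a b
            = pvBLoop rest sup hyp inside b [ch] := by
          simp only [pvBLoop]; rw [if_neg hd, if_neg hk]
        have hg : pvGen (ch::rest) inside a b = pvGen rest inside b [ch] := by
          simp only [pvGen, pvDelimB]; rw [if_neg hd, if_neg hk]
        rw [hl, hg]; exact ih sup hyp inside b [ch]

-- pvGen agrees with the segment-level key lists
lemma pvKeys_cons_false (s : List Char) (rest : List (List Char)) :
    pvKeys (s :: rest) false = (pvAbas s ++ (pvKeys rest true).1, (pvKeys rest true).2) := by
  simp [pvKeys]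

lemma pvKeys_cons_true (s : List Char) (rest : List (List Char)) :
    pvKeys (s :: rest) true = ((pvKeys rest false).1, pvBabs s ++ (pvKeys rest false).2) := by
  simp [pvKeys]

lemma pvAbas_cons2 (x y c : Char) (l : List Char) :
    pvAbas (x :: y :: c :: l)
      = (if (x == c && x != y) = true then [[x, y, x]] else []) ++ pvAbas (y :: c :: l) := by
  simp only [pvAbas, pvTriples_cons, List.filterMap_cons]
  by_cases h : (x == c && x != y) = true
  · simp [h]
  · simp [h]

lemma pvBabs_cons2 (x y c : Char) (l : List Char) :
    pvBabs (x :: y :: c :: l)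
      = (if (x == c && x != y) = true then [[y, x, y]] else []) ++ pvBabs (y :: c :: l) := by
  simp only [pvBabs, pvTriples_cons, List.filterMap_cons]
  by_cases h : (x == c && x != y) = true
  · simp [h]
  · simp [h]

lemma pv_gen_eq_keys (cs : List Char) (inside : Bool) (a b : List Char)
    (ha : a = [] ∨ ∃ x, a = [x]) (hb : b = [] ∨ ∃ y, b = [y]) (hab : a ≠ [] → b ≠ []) :
    pvGen cs inside a b = pvKeys (pvConsHead (a ++ b) (pvSplit cs)) inside := by
  induction cs generalizing inside a b with
  | nil =>
    have hlen : (a ++ b).length ≤ 2 := by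
      rcases ha with rfl | ⟨x, rfl⟩ <;> rcases hb with rfl | ⟨y, rfl⟩ <;> simp
    have h1 : pvAbas (a ++ b) = [] := by
      rw [pvAbas, pvTriples_short _ hlen]; rfl
    have h2 : pvBabs (a ++ b) = [] := by
      rw [pvBabs, pvTriples_short _ hlen]; rfl
    cases inside <;> simp [pvGen, pvSplit, pvConsHead, pvKeys, h1, h2]
  | cons c rest ih =>
    by_cases hd : pvDelimB c = true
    · have hg : pvGen (c::rest) inside a b = pvGen rest (!inside) [] [] := by
        simp only [pvGen]; rw [if_pos hd]
      have hs : pvSplit (c::rest) = [] :: pvSplit rest := by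
        simp only [pvSplit]; rw [if_pos hd]
      have hlen : (a ++ b).length ≤ 2 := by
        rcases ha with rfl | ⟨x, rfl⟩ <;> rcases hb with rfl | ⟨y, rfl⟩ <;> simp
      have h1 : pvAbas (a ++ b) = [] := by
        rw [pvAbas, pvTriples_short _ hlen]; rfl
      have h2 : pvBabs (a ++ b) = [] := by
        rw [pvBabs, pvTriples_short _ hlen]; rfl
      rw [hg, ih (!inside) [] [] (Or.inl rfl) (Or.inl rfl) (fun h => absurd rfl h)]
      simp only [List.append_nil, List.nil_append]
      rw [pvConsHead_nil (pvSplit_ne_nil rest), hs]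
      cases inside <;>
        simp [pvConsHead, pvKeys_cons_false, pvKeys_cons_true, h1, h2]
    · obtain ⟨h, t, hs⟩ : ∃ h t, pvSplit rest = h :: t := by
        cases e : pvSplit rest with
        | nil => exact absurd e (pvSplit_ne_nil rest)
        | cons h t => exact ⟨h, t, rfl⟩
      have hsplit : pvSplit (c::rest) = (c::h)::t := by
        simp only [pvSplit]; rw [if_neg hd, hs]
      rcases ha with rfl | ⟨x, rfl⟩
      · -- a = []: no key can be emitted
        have hg : pvGen (c::rest) inside [] b = pvGen rest inside b [c] := by
          simp only [pvGen]; rw [if_neg hd]; simp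
        rw [hg, ih inside b [c] hb (Or.inr ⟨c, rfl⟩) (fun _ => by simp), hs, hsplit]
        simp [pvConsHead]
      · obtain ⟨y, rfl⟩ : ∃ y, b = [y] := by
          rcases hb with rfl | hy
          · exact absurd (hab (by simp)) (fun hh => by simp at hh)
          · exact hy
        have hcond : (! ([x].isEmpty) && [x] == [c] && [x] != [y]) = (x == c && x != y) := by
          simp [bne]
        have hg : pvGen (c::rest) inside [x] [y]
            = (let p := pvGen rest inside [y] [c];
               if (x == c && x != y) = true then
                 if inside then (p.1, ([y] ++ [x] ++ [y]) :: p.2)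
                 else (([x] ++ [y] ++ [x]) :: p.1, p.2)
               else p) := by
          simp only [pvGen]; rw [if_neg hd, hcond]
        rw [hg, ih inside [y] [c] (Or.inr ⟨y, rfl⟩) (Or.inr ⟨c, rfl⟩) (fun _ => by simp),
          hs, hsplit]
        simp only [pvConsHead, List.cons_append, List.nil_append, List.singleton_append]
        by_cases hc : (x == c && x != y) = true <;> cases inside <;>
          simp only [hc, if_true, if_false, Bool.false_eq_true,
            pvKeys_cons_false, pvKeys_cons_true, pvAbas_cons2, pvBabs_cons2] <;>
          simp [pvAbas_cons2, pvBabs_cons2, hc]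

lemma pv_mem_abas (seg : List Char) (x : List Char) :
    x ∈ pvAbas seg ↔ ∃ p, ∃ _ : p + 2 < seg.length,
      seg[p] = seg[p+2] ∧ seg[p+1] ≠ seg[p] ∧ x = [seg[p], seg[p+1], seg[p]] := by
  unfold pvAbas
  simp only [List.mem_filterMap, pv_mem_triples, Option.ite_none_right_eq_some, Option.some.injEq]
  constructor
  · rintro ⟨t, ⟨k, hk, rfl⟩, hc, rfl⟩
    simp only [bne, beq_eq_decide, Bool.and_eq_true, decide_eq_true_eq,
      Bool.not_eq_true', decide_eq_false_iff_not] at hc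
    exact ⟨k, hk, hc.1, fun h => hc.2 h.symm, rfl⟩
  · rintro ⟨p, hp, hac, hba, rfl⟩
    refine ⟨(seg[p], seg[p+1], seg[p+2]), ⟨p, hp, rfl⟩, ?_, rfl⟩
    simp only [bne, beq_eq_decide, Bool.and_eq_true, decide_eq_true_eq,
      Bool.not_eq_true', decide_eq_false_iff_not]
    exact ⟨hac, fun h => hba h.symm⟩

lemma pv_mem_babs (seg : List Char) (x : List Char) :
    x ∈ pvBabs seg ↔ ∃ p, ∃ _ : p + 2 < seg.length,
      seg[p] = seg[p+2] ∧ seg[p+1] ≠ seg[p] ∧ x = [seg[p+1], seg[p], seg[p+1]] := by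
  unfold pvBabs
  simp only [List.mem_filterMap, pv_mem_triples, Option.ite_none_right_eq_some, Option.some.injEq]
  constructor
  · rintro ⟨t, ⟨k, hk, rfl⟩, hc, rfl⟩
    simp only [bne, beq_eq_decide, Bool.and_eq_true, decide_eq_true_eq,
      Bool.not_eq_true', decide_eq_false_iff_not] at hc
    exact ⟨k, hk, hc.1, fun h => hc.2 h.symm, rfl⟩
  · rintro ⟨p, hp, hac, hba, rfl⟩
    refine ⟨(seg[p], seg[p+1], seg[p+2]), ⟨p, hp, rfl⟩, ?_, rfl⟩
    simp only [bne, beq_eq_decide, Bool.and_eq_true, decide_eq_true_eq,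
      Bool.not_eq_true', decide_eq_false_iff_not]
    exact ⟨hac, fun h => hba h.symm⟩

lemma pv_mem_keys_fst (segs : List (List Char)) (parity : Bool) (x : List Char) :
    x ∈ (pvKeys segs parity).1 ↔
      ∃ j, ∃ _ : j < segs.length, (j % 2 = 0 ↔ parity = false) ∧ x ∈ pvAbas segs[j] := by
  induction segs generalizing parity with
  | nil => simp [pvKeys]
  | cons s rest ih =>
    cases parity with
    | false =>
      have e : pvKeys (s::rest) false
          = (pvAbas s ++ (pvKeys rest true).1, (pvKeys rest true).2) := by
        simp [pvKeys]
      rw [e]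
      simp only [List.mem_append, ih, List.length_cons]
      constructor
      · rintro (hx | ⟨j, hj, hpar, hx⟩)
        · exact ⟨0, by omega, by simp, hx⟩
        · have hodd : ¬ (j % 2 = 0) := by simpa using hpar
          exact ⟨j+1, by omega, by simp; omega, by simpa using hx⟩
      · rintro ⟨j, hj, hpar, hx⟩
        match j, hj with
        | 0, _ => exact Or.inl (by simpa using hx)
        | k+1, hj =>
          have h0 : (k+1) % 2 = 0 := by simpa using hpar
          exact Or.inr ⟨k, by omega, by simp; omega, by simpa using hx⟩
    | true =>
      have e : pvKeys (s::rest) true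
          = ((pvKeys rest false).1, pvBabs s ++ (pvKeys rest false).2) := by
        simp [pvKeys]
      rw [e]
      simp only [ih, List.length_cons]
      constructor
      · rintro ⟨j, hj, hpar, hx⟩
        have h0 : j % 2 = 0 := by simpa using hpar
        exact ⟨j+1, by omega, by simp; omega, by simpa using hx⟩
      · rintro ⟨j, hj, hpar, hx⟩
        match j, hj with
        | 0, _ => exact absurd (by omega : (0:Nat)%2 = 0) (by simpa using hpar)
        | k+1, hj =>
          have h1 : ¬ ((k+1) % 2 = 0) := by simpa using hpar
          exact ⟨k, by omega, by simp; omega, by simpa using hx⟩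

lemma pv_mem_keys_snd (segs : List (List Char)) (parity : Bool) (x : List Char) :
    x ∈ (pvKeys segs parity).2 ↔
      ∃ i, ∃ _ : i < segs.length, (i % 2 = 1 ↔ parity = false) ∧ x ∈ pvBabs segs[i] := by
  induction segs generalizing parity with
  | nil => simp [pvKeys]
  | cons s rest ih =>
    cases parity with
    | false =>
      have e : pvKeys (s::rest) false
          = (pvAbas s ++ (pvKeys rest true).1, (pvKeys rest true).2) := by
        simp [pvKeys]
      rw [e]
      simp only [ih, List.length_cons]
      constructor
      · rintro ⟨i, hi, hpar, hx⟩
        have h0 : ¬ (i % 2 = 1) := by simpa using hpar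
        exact ⟨i+1, by omega, by simp; omega, by simpa using hx⟩
      · rintro ⟨i, hi, hpar, hx⟩
        match i, hi with
        | 0, _ => exact absurd ((by simpa using hpar : (0:Nat)%2 = 1)) (by omega)
        | k+1, hi =>
          have h1 : (k+1) % 2 = 1 := by simpa using hpar
          exact ⟨k, by omega, by simp; omega, by simpa using hx⟩
    | true =>
      have e : pvKeys (s::rest) true
          = ((pvKeys rest false).1, pvBabs s ++ (pvKeys rest false).2) := by
        simp [pvKeys]
      rw [e]
      simp only [List.mem_append, ih, List.length_cons]
      constructor
      · rintro (hx | ⟨i, hi, hpar, hx⟩)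
        · exact ⟨0, by omega, by simp, hx⟩
        · have h0 : i % 2 = 1 := by simpa using hpar
          exact ⟨i+1, by omega, by simp; omega, by simpa using hx⟩
      · rintro ⟨i, hi, hpar, hx⟩
        match i, hi with
        | 0, _ => exact Or.inl (by simpa using hx)
        | k+1, hi =>
          have h1 : ¬ ((k+1) % 2 = 1) := by simpa using hpar
          exact Or.inr ⟨k, by omega, by simp; omega, by simpa using hx⟩

-- ---------- parser bridge: A's replace/replace/split = pvSplit ----------

lemma pv_replace_go_map (d r : Char) (fuel : Nat) (l acc : List Char) (h : l.length ≤ fuel) :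
    PySem.Chars.replace.go [d] [r] fuel l acc
      = acc.reverse ++ l.map (fun c => if c = d then r else c) := by
  induction fuel generalizing l acc with
  | zero =>
    match l, h with
    | [], _ => simp [PySem.Chars.replace.go]
  | succ f ihf =>
    match l with
    | [] => simp [PySem.Chars.replace.go]
    | c :: t =>
      rw [PySem.Chars.replace.go]
      by_cases hc : c = d
      · rw [if_pos (by simp [hc, List.isPrefixOf])]
        rw [ihf _ _ (by simpa using Nat.le_of_succ_le_succ h)]
        simp [hc]
      · rw [if_neg (by simp [List.isPrefixOf]; exact fun hh => absurd hh.symm hc)]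
        rw [ihf _ _ (by simpa using Nat.le_of_succ_le_succ h)]
        simp [hc]

lemma pv_replace_single (cs : List Char) (d r : Char) :
    PySem.Chars.replace cs [d] [r] = cs.map (fun c => if c = d then r else c) := by
  rw [PySem.Chars.replace]
  simp only [List.isEmpty_cons, Bool.false_eq_true, if_false]
  rw [pv_replace_go_map d r cs.length cs [] (le_refl _)]
  simp

lemma pv_split_go (l : List Char) (fuel : Nat) (cur : List Char) (acc : List (List Char))
    (h : l.length < fuel) :
    PySem.Chars.splitOn.go ['_'] fuel (l.map (fun c => if pvDelimB c then '_' else c)) cur acc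
      = acc.reverse ++ pvConsHead cur.reverse (pvSplit l) := by
  induction l generalizing fuel cur acc with
  | nil =>
    match fuel, h with
    | f + 1, _ => simp [PySem.Chars.splitOn.go, pvSplit, pvConsHead]
  | cons c rest ih =>
    match fuel, h with
    | f + 1, h =>
      by_cases hd : pvDelimB c = true
      · rw [List.map_cons, if_pos hd, PySem.Chars.splitOn.go]
        rw [if_pos (by simp [List.isPrefixOf])]
        simp only [List.length_nil, List.length_cons, Nat.zero_add, List.drop_succ_cons,
          List.drop_zero]
        rw [ih f [] (cur.reverse :: acc) (by simpa using Nat.lt_of_succ_lt_succ h)]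
        simp only [List.reverse_nil]
        rw [pvConsHead_nil (pvSplit_ne_nil rest)]
        simp only [pvSplit]
        rw [if_pos hd]
        simp [pvConsHead]
      · have hcu : ¬ (c = '_') := fun hh => hd (by simp [pvDelimB, hh])
        rw [List.map_cons, if_neg hd, PySem.Chars.splitOn.go]
        rw [if_neg (by simp [List.isPrefixOf]; exact fun hh => absurd hh.symm hcu)]
        rw [ih f (c :: cur) acc (by simpa using Nat.lt_of_succ_lt_succ h)]
        simp only [pvSplit]
        rw [if_neg hd]
        cases e : pvSplit rest with
        | nil => exact absurd e (pvSplit_ne_nil rest)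
        | cons hh tt => simp [pvConsHead, e]

lemma pv_splitOn_underscore (cs : List Char) :
    PySem.Chars.splitOn (cs.map (fun c => if pvDelimB c then '_' else c)) ['_'] = pvSplit cs := by
  rw [PySem.Chars.splitOn]
  rw [pv_split_go cs _ [] [] (by simp)]
  simp only [List.reverse_nil, List.nil_append]
  exact pvConsHead_nil (pvSplit_ne_nil cs)

lemma pv_parse_eq_split (cs : List Char) : pvParseInput cs = pvSplit cs := by
  show PySem.Chars.splitOn
      (PySem.Chars.replace (PySem.Chars.replace cs [']'] ['_']) ['['] ['_']) ['_'] = pvSplit cs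
  rw [pv_replace_single, pv_replace_single, List.map_map]
  rw [show ((fun c => if c = '[' then '_' else c) ∘ (fun c => if c = ']' then '_' else c))
        = (fun c => if pvDelimB c then '_' else c) from ?_]
  · exact pv_splitOn_underscore cs
  · funext c
    by_cases h1 : c = ']'
    · simp [h1, pvDelimB]
    · by_cases h2 : c = '['
      · simp [h1, h2, pvDelimB]
      · by_cases h3 : c = '_'
        · simp [h3, pvDelimB]
        · simp [h1, h2, h3, pvDelimB]

-- ---------- assembling ----------

lemma pv_B_iff (cs : List Char) :
    pvBLoop cs PySem.Set.empty PySem.Set.empty false [] [] = true ↔ pvGood (pvSplit cs) := by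
  rw [pv_loop_iff]
  have hgen : pvGen cs false [] [] = pvKeys (pvSplit cs) false := by
    rw [pv_gen_eq_keys cs false [] [] (Or.inl rfl) (Or.inl rfl) (fun h => absurd rfl h)]
    rw [show (([] : List Char) ++ []) = ([] : List Char) from rfl,
      pvConsHead_nil (pvSplit_ne_nil cs)]
  rw [hgen]
  simp only [PySem.Set.empty, List.not_mem_nil, false_or]
  constructor
  · rintro ⟨x, hx⟩
    obtain ⟨h1, h2⟩ : x ∈ (pvKeys (pvSplit cs) false).1 ∧ x ∈ (pvKeys (pvSplit cs) false).2 := by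
      rcases hx with ⟨h1, h2⟩ | ⟨h2, h1⟩ <;> exact ⟨h1, h2⟩
    rw [pv_mem_keys_fst] at h1
    rw [pv_mem_keys_snd] at h2
    obtain ⟨j, hj, hje, hxa⟩ := h1
    obtain ⟨i, hi, hie, hxb⟩ := h2
    rw [pv_mem_abas] at hxa
    rw [pv_mem_babs] at hxb
    obtain ⟨p, hp, hac, hba, rfl⟩ := hxa
    obtain ⟨q, hq, hac', hba', heq⟩ := hxb
    refine ⟨j, hj, i, hi, by simpa using hje, by simpa using hie,
      p, hp, q, hq, hac, hba, hac', hba', ?_⟩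
    rw [← hac]
    exact heq
  · rintro ⟨j, hj, i, hi, hje, hie, p, hp, q, hq, hac, hba, hac', hba', heq⟩
    refine ⟨[(pvSplit cs)[j][p], (pvSplit cs)[j][p+1], (pvSplit cs)[j][p]],
      Or.inl ⟨?_, ?_⟩⟩
    · rw [pv_mem_keys_fst]
      exact ⟨j, hj, by simp [hje], (pv_mem_abas _ _).mpr ⟨p, hp, hac, hba, rfl⟩⟩
    · rw [pv_mem_keys_snd]
      refine ⟨i, hi, by simp [hie], (pv_mem_babs _ _).mpr ⟨q, hq, hac', hba', ?_⟩⟩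
      rw [hac]
      rw [hac] at heq
      exact heq

-- ===== VERDICT (by name: the statement is the Claim_ definition above) =====
theorem linePassesPartTwo_spec : Claim_equal_linePassesPartTwo := by
  intro line _
  unfold Spec_linePassesPartTwo linePassesPartTwo linePassesPartTwo_alt
  rw [Bool.eq_iff_iff]
  rw [pv_A_iff, pv_B_iff, pv_parse_eq_split]
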